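-- pv_equiv track=rewrite | github.com/Kryptagora/AdventOfCode | 2020/15/solutions.py | find_last_occurence
-- ===== SOURCE A (Python) =====
-- def find_last_occurence(history:list, element:int):
--     indices = [None, None]
--     for i in reversed(range(len(history))):
--         if history[i] == element and indices[1] is None:
--             indices[1] = i
--         elif history[i] == element and indices[0] is None:
--             indices[0] = i
--         if None not in indices:
--             return indices
-- ===== SOURCE B (Python) =====
-- def find_last_occurence(history: list, element: int):
--     prev = None
--     last = None
--     for i, x in enumerate(history):
--         if x == element:
--             prev = last
--             last = i
--     if prev is not None:
--         return [prev, last]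
--     return None
-- ===== Notes on version B (the rewrite author's own statement) =====
-- stated objective: simpler
-- what changed: Single forward pass with enumerate keeping two scalars (prev, last) instead of a reverse index scan over a two-slot list with early exit.
import Mathlib
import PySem

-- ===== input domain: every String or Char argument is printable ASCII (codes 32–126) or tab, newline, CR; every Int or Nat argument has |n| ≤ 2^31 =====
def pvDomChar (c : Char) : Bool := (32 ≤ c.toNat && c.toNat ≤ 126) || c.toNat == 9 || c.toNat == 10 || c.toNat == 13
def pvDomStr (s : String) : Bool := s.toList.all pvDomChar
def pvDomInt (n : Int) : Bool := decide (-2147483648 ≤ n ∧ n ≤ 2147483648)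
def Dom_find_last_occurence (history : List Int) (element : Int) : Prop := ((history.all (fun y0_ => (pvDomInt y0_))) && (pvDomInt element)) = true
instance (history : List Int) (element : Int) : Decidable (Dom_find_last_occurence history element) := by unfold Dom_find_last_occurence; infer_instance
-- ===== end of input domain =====

-- B replaces A's reverse index scan (two-slot list, early exit) by a single forward
-- pass keeping two scalars prev/last; objective: simpler.


-- ===== PORT A =====
-- loop over `reversed(range(len(history)))`; `history[i]` is always in range, so
-- `getD` is exact here.  State = the two slots of `indices`.
def find_last_occurence_go (history : List Int) (element : Int) :
    List Nat → Option Int × Option Int → Option (List Int)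
  | [], _ => none
  | i :: rest, (o0, o1) =>
    let s :=
      if history.getD i 0 = element ∧ o1 = none then (o0, some (i : Int))
      else if history.getD i 0 = element ∧ o0 = none then (some (i : Int), o1)
      else (o0, o1)
    if s.1 ≠ none ∧ s.2 ≠ none then some [s.1.getD 0, s.2.getD 0]
    else find_last_occurence_go history element rest s

def find_last_occurence (history : List Int) (element : Int) : Option (List Int) :=
  find_last_occurence_go history element (List.range history.length).reverse (none, none)

-- ===== PORT B =====
-- single forward pass with enumerate, keeping two scalars prev/last
def find_last_occurence_alt (history : List Int) (element : Int) : Option (List Int) :=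
  let s := (history.zipIdx).foldl
    (fun (s : Option Int × Option Int) (xi : Int × Nat) =>
      if xi.1 = element then (s.2, some (xi.2 : Int)) else s)
    (none, none)
  match s.1 with
  | some p => some [p, s.2.getD 0]   -- prev ≠ None implies last ≠ None; getD is a totality artifact
  | none => none

-- ===== PRECONDITION & SPEC =====
def Spec_find_last_occurence (history : List Int) (element : Int) (out : Option (List Int)) : Prop := out = find_last_occurence_alt history element
instance (history : List Int) (element : Int) (out : Option (List Int)) : Decidable (Spec_find_last_occurence history element out) := by unfold Spec_find_last_occurence; infer_instance

-- ===== CLAIM (what is proved, stated in full; the proofs are below) =====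
def Claim_equal_find_last_occurence : Prop := ∀ (history : List Int) (element : Int), Dom_find_last_occurence history element → Spec_find_last_occurence history element (find_last_occurence history element)

-- ===== LEMMAS AND PROOFS =====

-- the increasing list of indices (offset k) at which `element` occurs
def matchIdx (element : Int) : List Int → Nat → List Int
  | [], _ => []
  | x :: t, k =>
    if x = element then (k : Int) :: matchIdx element t (k + 1)
    else matchIdx element t (k + 1)

def stepB (s : Option Int × Option Int) (m : Int) : Option Int × Option Int := (s.2, some m)

-- B's fold over zipIdx only reacts to matches
theorem foldB_eq_matchIdx (element : Int) (h : List Int) (k : Nat)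
    (s : Option Int × Option Int) :
    (h.zipIdx k).foldl
      (fun (s : Option Int × Option Int) (xi : Int × Nat) =>
        if xi.1 = element then (s.2, some (xi.2 : Int)) else s) s
    = (matchIdx element h k).foldl stepB s := by
  induction h generalizing k s with
  | nil => simp [matchIdx]
  | cons x t ih =>
    simp only [List.zipIdx_cons, List.foldl_cons, matchIdx]
    by_cases hx : x = element <;> simp [hx, stepB, ih]

-- the final state of the match fold, by the reverse of the match list
theorem foldB_final (ms : List Int) (s : Option Int × Option Int) :
    ms.foldl stepB s
    = match ms.reverse with
      | [] => s
      | [m] => (s.2, some m)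
      | m1 :: m2 :: _ => (some m2, some m1) := by
  induction ms generalizing s with
  | nil => simp
  | cons m t ih =>
    rw [List.foldl_cons, ih]
    rcases ht : t.reverse with _ | ⟨m1, _ | ⟨m2, r⟩⟩ <;>
      simp [List.reverse_cons, ht, stepB]

-- A's scan with one slot already filled: first further match returns
theorem A_go_one (history : List Int) (element : Int) (is : List Nat) (j : Int) :
    find_last_occurence_go history element is (none, some j)
    = match is.filter (fun i => history[i]?.getD 0 = element) with
      | [] => none
      | i :: _ => some [(i : Int), j] := by
  induction is with
  | nil => simp [find_last_occurence_go]
  | cons i rest ih =>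
    by_cases hx : history[i]?.getD 0 = element <;>
      simp [find_last_occurence_go, hx, ih]

-- A's scan from the empty state: determined by the first two matches
theorem A_go_zero (history : List Int) (element : Int) (is : List Nat) :
    find_last_occurence_go history element is (none, none)
    = match is.filter (fun i => history[i]?.getD 0 = element) with
      | i1 :: i2 :: _ => some [(i2 : Int), (i1 : Int)]
      | _ => none := by
  induction is with
  | nil => simp [find_last_occurence_go]
  | cons i rest ih =>
    by_cases hx : history[i]?.getD 0 = element
    · simp [find_last_occurence_go, hx, A_go_one]
      rcases rest.filter (fun i => history[i]?.getD 0 = element) with _ | ⟨i2, r⟩ <;> simp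
    · simp [find_last_occurence_go, hx, ih]

-- matchIdx = the filtered index range, cast to Int with offset
theorem matchIdx_eq_filter_range (element : Int) (h : List Int) (k : Nat) :
    matchIdx element h k
    = ((List.range h.length).filter (fun i => h[i]?.getD 0 = element)).map
        (fun i : Nat => ((i : Int) + (k : Int))) := by
  induction h generalizing k with
  | nil => simp [matchIdx]
  | cons x t ih =>
    have hfm : (List.map Nat.succ (List.range t.length)).filter
          (fun i => (x :: t)[i]?.getD 0 = element)
        = (List.filter (fun i => t[i]?.getD 0 = element) (List.range t.length)).map Nat.succ := by
      rw [List.filter_map]; congr 1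
    have htail : ((List.filter (fun i => t[i]?.getD 0 = element) (List.range t.length)).map
          Nat.succ).map (fun i : Nat => ((i : Int) + (k : Int)))
        = (List.filter (fun i => t[i]?.getD 0 = element) (List.range t.length)).map
          (fun i : Nat => ((i : Int) + ((k + 1 : Nat) : Int))) := by
      rw [List.map_map]
      apply List.map_congr_left
      intro i _
      simp [Function.comp, Nat.succ_eq_add_one]
      ring
    have hlen : (x :: t).length = t.length + 1 := rfl
    simp only [matchIdx, hlen, List.range_succ_eq_map, List.filter_cons, hfm, ih]
    have hp0 : (decide ((x :: t)[0]?.getD 0 = element)) = decide (x = element) := by simp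
    rw [hp0]
    by_cases hx : x = element
    · rw [if_pos hx, if_pos (by simp [hx]), List.map_cons, htail]
      refine congrArg₂ List.cons (by simp) rfl
    · rw [if_neg hx, if_neg (by simp [hx]), htail]

theorem find_last_occurence_eq_alt (history : List Int) (element : Int) :
    find_last_occurence history element = find_last_occurence_alt history element := by
  unfold find_last_occurence find_last_occurence_alt
  rw [foldB_eq_matchIdx, foldB_final, matchIdx_eq_filter_range]
  rw [A_go_zero, List.filter_reverse]
  rw [← List.map_reverse]
  generalize ((List.range history.length).filter
      (fun i => history[i]?.getD 0 = element)).reverse = L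
  rcases L with _ | ⟨i1, _ | ⟨i2, r⟩⟩ <;> simp

-- ===== VERDICT (by name: the statement is the Claim_ definition above) =====
theorem find_last_occurence_spec : Claim_equal_find_last_occurence := by
  intro history element _
  exact find_last_occurence_eq_alt history element
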